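-- pv_equiv track=rewrite | github.com/ducmanh-jr/68CS2 | Nguyen Duc Manh 2.1/🧀 Discrete Mathematics/🍣 practice/1 nguyen ly dem co ban/1.6 so catalan/ma37trinhbay.py | catalan_walks
-- ===== SOURCE A (Python) =====
-- def catalan_walks(a, b, n):
--     # Base case: if we've reached the end (a == n), complete the path with 'U' moves
--     if a == n:
--         return ['U' * (n - b)]
--
--     W = []
--
--     # Only add right moves if we haven't exceeded the number of up moves
--     if a >= b:
--         for w in catalan_walks(a + 1, b, n):
--             W.append('R' + w)
--
--     # Only add up moves if we haven't reached the end yet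
--     if a > b:
--         for w in catalan_walks(a, b + 1, n):
--             W.append('U' + w)
--
--     return W
-- ===== SOURCE B (Python) =====
-- def catalan_walks(a, b, n):
--     # Iterative DFS with an explicit stack of (a, b, prefix) frames instead of
--     # A's list-returning recursion; U is pushed before R so R is popped first,
--     # preserving A's output order.
--     W = []
--     stack = [(a, b, '')]
--     while stack:
--         a0, b0, p = stack.pop()
--         if a0 == n:
--             W.append(p + 'U' * (n - b0))
--             continue
--         if a0 > b0:
--             stack.append((a0, b0 + 1, p + 'U'))
--         if a0 >= b0:
--             stack.append((a0 + 1, b0, p + 'R'))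
--     return W
-- ===== Notes on version B (the rewrite author's own statement) =====
-- stated objective: alternative
-- what changed: Replaces A's list-returning recursion (each level prepends a character to every string of every recursive result) by an iterative depth-first search over an explicit stack of (a, b, prefix) frames, appending each finished walk to one result list.
import Mathlib
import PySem

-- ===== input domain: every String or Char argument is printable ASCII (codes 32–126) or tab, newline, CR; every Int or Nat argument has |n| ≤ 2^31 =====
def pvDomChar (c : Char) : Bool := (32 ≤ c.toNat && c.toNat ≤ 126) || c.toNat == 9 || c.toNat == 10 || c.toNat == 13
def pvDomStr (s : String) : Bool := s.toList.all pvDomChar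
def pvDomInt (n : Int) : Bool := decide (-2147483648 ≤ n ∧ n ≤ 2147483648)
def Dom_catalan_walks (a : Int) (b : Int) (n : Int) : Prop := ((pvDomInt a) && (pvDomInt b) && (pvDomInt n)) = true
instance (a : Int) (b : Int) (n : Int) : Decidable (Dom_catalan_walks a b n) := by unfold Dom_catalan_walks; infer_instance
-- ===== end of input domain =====

-- B replaces A's list-returning recursion by an iterative DFS over an explicit stack of
-- (a, b, prefix) frames (alternative decomposition, same cost, same output order).

-- 'U' * k in Python (empty for k ≤ 0); exact: Int.toNat clamps negatives to 0.
def pyRepU (k : Int) : String := String.ofList (List.replicate k.toNat 'U')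

-- Strictly more than the recursion depth 2n - a - b; on every input admitted by Pre_
-- this fuel is never exhausted, so both ports compute their Python's value there.
def pvFuel (a : Int) (b : Int) (n : Int) : Nat := (2*n - a - b).toNat + 1

-- ===== PORT A =====
def walksA : Nat → Int → Int → Int → List String
  | 0, _, _, _ => []
  | f+1, a, b, n =>
    if a = n then [pyRepU (n - b)]
    else
      (if a ≥ b then (walksA f (a+1) b n).map (fun w => "R" ++ w) else [])
        ++ (if a > b then (walksA f a (b+1) n).map (fun w => "U" ++ w) else [])

def catalan_walks (a : Int) (b : Int) (n : Int) : List String :=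
  walksA (pvFuel a b n) a b n

-- ===== PORT B =====
-- A frame is (a, b, prefix) plus a per-frame fuel (a totality device only: within Pre_
-- it never runs out).  The head of the list is the top of Python's stack; Python pushes
-- the U frame before the R frame, so the R frame ends up on top.
def loopB (n : Int) (stack : List (Int × Int × String × Nat)) (W : List String) : List String :=
  match stack with
  | [] => W
  | (a, b, p, f) :: rest =>
    if a = n then loopB n rest (W ++ [p ++ pyRepU (n - b)])
    else
      match f with
      | 0 => loopB n rest W
      | g+1 =>
        loopB n ((if a ≥ b then [(a + 1, b, p ++ "R", g)] else [])
                  ++ (if a > b then [(a, b + 1, p ++ "U", g)] else []) ++ rest) W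
termination_by (stack.map (fun t => 3 ^ t.2.2.2)).sum
decreasing_by
  all_goals simp
  all_goals
    have h3 : 0 < 3 ^ g := by positivity
    split_ifs <;> simp <;> omega

def catalan_walks_alt (a : Int) (b : Int) (n : Int) : List String :=
  loopB n [(a, b, "", pvFuel a b n - 1)] []

-- ===== PRECONDITION & SPEC =====
-- Pre_ excludes exactly the inputs (a > n and a ≥ b) on which the Python A recurses
-- forever in its first argument and dies with RecursionError (B loops forever likewise).
def Pre_catalan_walks (a : Int) (b : Int) (n : Int) : Prop := a ≤ n ∨ a < b
instance (a : Int) (b : Int) (n : Int) : Decidable (Pre_catalan_walks a b n) := by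
  unfold Pre_catalan_walks; infer_instance
def pvWitness_catalan_walks : Int × Int × Int := (0, 0, 3)

def Spec_catalan_walks (a : Int) (b : Int) (n : Int) (out : List String) : Prop := out = catalan_walks_alt a b n
instance (a : Int) (b : Int) (n : Int) (out : List String) : Decidable (Spec_catalan_walks a b n out) := by unfold Spec_catalan_walks; infer_instance

-- ===== CLAIM (what is proved, stated in full; the proofs are below) =====
def Claim_equal_catalan_walks : Prop := ∀ (a : Int) (b : Int) (n : Int), Dom_catalan_walks a b n → Pre_catalan_walks a b n → Spec_catalan_walks a b n (catalan_walks a b n)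

-- ===== LEMMAS AND PROOFS =====

-- Popping one frame of fuel f contributes exactly the walks of A's recursion at fuel
-- f+1 (fuel exhaustion in loopB corresponds to walksA 0 = []), each prefixed by p,
-- appended behind the walks already accumulated.
theorem loopB_frame (f : Nat) : ∀ (a b n : Int) (p : String)
    (rest : List (Int × Int × String × Nat)) (W : List String),
    loopB n ((a, b, p, f) :: rest) W
      = loopB n rest (W ++ (walksA (f + 1) a b n).map (fun w => p ++ w)) := by
  induction f with
  | zero =>
    intro a b n p rest W
    by_cases h : a = n
    · simp [loopB, walksA, h]
    · simp [loopB, walksA, h]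
  | succ g ih =>
    intro a b n p rest W
    by_cases h : a = n
    · simp [loopB, walksA, h]
    · by_cases h1 : a ≥ b
      · by_cases h2 : a > b
        · simp [loopB, walksA, h, h1, h2, ih, List.map_map, Function.comp_def,
            String.append_assoc, List.append_assoc]
        · simp [loopB, walksA, h, h1, h2, ih, List.map_map, Function.comp_def,
            String.append_assoc]
      · have h2 : ¬ a > b := by omega
        simp [loopB, walksA, h, h1, h2]

-- ===== VERDICT (by name: the statement is the Claim_ definition above) =====
theorem catalan_walks_spec : Claim_equal_catalan_walks := by
  intro a b n _ _
  unfold Spec_catalan_walks catalan_walks catalan_walks_alt pvFuel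
  rw [loopB_frame]
  simp [loopB]
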